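-- pv_equiv track=rewrite | github.com/0xStryK3R/Scaler-DSA-Revision | python/Day-64/CW_1.py | solve
-- ===== SOURCE A (Python) =====
-- import heapq
--
-- def solve(A):
--     heapq.heapify(A)
--     cost = 0
--
--     while(len(A) > 1):
--         sumx = heapq.heappop(A)+heapq.heappop(A)
--         cost += sumx
--         heapq.heappush(A,sumx)
--
--     return cost
-- ===== SOURCE B (Python) =====
-- def _insert_sorted(xs, x):
--     # insert x into the sorted list xs, keeping it sorted
--     out = []
--     i = 0
--     while i < len(xs) and xs[i] < x:
--         out.append(xs[i])
--         i += 1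
--     return out + [x] + xs[i:]
--
--
-- def solve(A):
--     rest = sorted(A)
--     cost = 0
--     while len(rest) > 1:
--         s = rest[0] + rest[1]
--         cost += s
--         rest = _insert_sorted(rest[2:], s)
--     return cost
-- ===== Notes on version B (the rewrite author's own statement) =====
-- stated objective: alternative
-- what changed: Replaces the binary heap (heapify + sift-up/sift-down pops and pushes) with one initial sort followed by a greedy scan that repeatedly takes the two front elements of a sorted list and reinserts their sum by linear ordered insertion; the cost is identical because both always combine the two smallest remaining values.
import Mathlib
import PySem

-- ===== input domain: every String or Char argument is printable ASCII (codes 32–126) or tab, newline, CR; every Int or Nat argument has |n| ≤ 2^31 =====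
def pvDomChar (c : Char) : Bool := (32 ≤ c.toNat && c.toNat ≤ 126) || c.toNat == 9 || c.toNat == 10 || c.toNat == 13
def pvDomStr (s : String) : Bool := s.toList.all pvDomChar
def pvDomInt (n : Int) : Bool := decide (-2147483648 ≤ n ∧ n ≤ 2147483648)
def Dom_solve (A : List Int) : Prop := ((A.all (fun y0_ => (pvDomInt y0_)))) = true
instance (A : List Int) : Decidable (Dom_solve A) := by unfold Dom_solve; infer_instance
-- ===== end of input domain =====

-- B replaces A's binary heap with sort + linear ordered reinsertion of the partial sums; equivalence is
-- about the RETURN value only (Python A additionally mutates its argument list in place, B does not).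

-- ===== PORT A =====
-- Port of heapq (A's library calls heapify/heappop/heappush), hand-ported step for step from CPython's
-- heapq.py (_siftup, _siftdown); list indices are always in range by construction, so List.getD/List.set
-- are exact here. Each while-loop carries a fuel argument that is a strict upper bound on its number of
-- iterations (a pure totalization guard; the wrappers pass enough fuel, so the guard never fires).

-- index of the smaller child chosen by _siftup's loop body (the 'childpos' update)
def minChild (l : List Int) (pos : Nat) : Nat :=
  if 2*pos+2 < l.length ∧ ¬ (l.getD (2*pos+1) 0 < l.getD (2*pos+2) 0) then 2*pos+2 else 2*pos+1

-- the while-loop of heapq._siftup (moves the smaller child up, descends to a leaf);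
-- fuel ≥ l.length - pos iterations suffice (pos strictly increases, bounded by the length)
def siftupLoop : Nat → List Int → Nat → List Int × Nat
  | 0, l, pos => (l, pos)
  | fuel+1, l, pos =>
    if 2*pos+1 < l.length then
      siftupLoop fuel (l.set pos (l.getD (minChild l pos) 0)) (minChild l pos)
    else (l, pos)

-- the while-loop of heapq._siftdown(heap, startpos, pos); fuel ≥ pos suffices (pos strictly decreases)
def siftdownLoop : Nat → List Int → Nat → Nat → Int → List Int × Nat
  | 0, l, _, pos, _ => (l, pos)
  | fuel+1, l, startpos, pos, newitem =>
    if startpos < pos then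
      if newitem < l.getD ((pos-1)/2) 0 then
        siftdownLoop fuel (l.set pos (l.getD ((pos-1)/2) 0)) startpos ((pos-1)/2) newitem
      else (l, pos)
    else (l, pos)

def siftdown (l : List Int) (startpos pos : Nat) : List Int :=
  let newitem := l.getD pos 0
  let r := siftdownLoop (pos+1) l startpos pos newitem
  r.1.set r.2 newitem

-- heapq._siftup(heap, pos)
def siftup (l : List Int) (pos : Nat) : List Int :=
  let newitem := l.getD pos 0
  let r := siftupLoop l.length l pos
  siftdown (r.1.set r.2 newitem) pos r.2

-- heapq.heapify: for i in reversed(range(n//2)): _siftup(x, i)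
def heapify (l : List Int) : List Int :=
  (List.range (l.length / 2)).reverse.foldl (fun h i => siftup h i) l

-- heapq.heappop (an empty heap would raise IndexError in Python; that case is unreachable under
-- solve's len > 1 guard, the value returned for it here is irrelevant)
def heappop (l : List Int) : Int × List Int :=
  if l.dropLast.isEmpty then (l.getLast?.getD 0, l.dropLast)
  else (l.dropLast.getD 0 0, siftup (l.dropLast.set 0 (l.getLast?.getD 0)) 0)

-- heapq.heappush
def heappush (l : List Int) (item : Int) : List Int :=
  siftdown (l ++ [item]) 0 l.length

-- the while-loop of solve; fuel ≥ the heap's length suffices (each iteration shrinks it by one)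
def solveLoop : Nat → List Int → Int → Int
  | 0, _, cost => cost
  | fuel+1, l, cost =>
    if l.length > 1 then
      let p1 := heappop l
      let p2 := heappop p1.2
      let sumx := p1.1 + p2.1
      solveLoop fuel (heappush p2.2 sumx) (cost + sumx)
    else cost

def solve (A : List Int) : Int := solveLoop (heapify A).length (heapify A) 0

-- ===== PORT B =====
-- _insert_sorted(xs, x): insert x into sorted xs keeping it sorted (linear scan)
def insSorted (xs : List Int) (x : Int) : List Int :=
  match xs with
  | [] => [x]
  | h :: t => if h < x then h :: insSorted t x else x :: h :: t

-- the while-loop of B's solve; fuel ≥ the list's length suffices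
def solveAltLoop : Nat → List Int → Int → Int
  | 0, _, cost => cost
  | fuel+1, rest, cost =>
    match rest with
    | a :: b :: t => solveAltLoop fuel (insSorted t (a+b)) (cost + (a+b))
    | _ => cost

def solve_alt (A : List Int) : Int :=
  solveAltLoop (PySem.List.sorted A (fun x => x) false).length
    (PySem.List.sorted A (fun x => x) false) 0

-- ===== PRECONDITION & SPEC =====
def Spec_solve (A : List Int) (out : Int) : Prop := out = solve_alt A
instance (A : List Int) (out : Int) : Decidable (Spec_solve A out) := by unfold Spec_solve; infer_instance

-- ===== CLAIM (what is proved, stated in full; the proofs are below) =====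
def Claim_equal_solve : Prop := ∀ (A : List Int), Dom_solve A → Spec_solve A (solve A)

-- ===== LEMMAS AND PROOFS =====

theorem minChild_gt_lt (l : List Int) (pos : Nat) (h : 2*pos+1 < l.length) :
    pos < minChild l pos ∧ minChild l pos < l.length := by
  unfold minChild; split_ifs with h2
  · exact ⟨by omega, h2.1⟩
  · exact ⟨by omega, h⟩

-- heap-shape predicates: HeapFrom l k = every parent i ≥ k is ≤ its children;
-- PartialHeap l s hole = the same, restricted to i ≥ s and ignoring pairs touching the 'hole' slot.
def HeapFrom (l : List Int) (k : Nat) : Prop :=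
  ∀ i j, k ≤ i → (j = 2*i+1 ∨ j = 2*i+2) → j < l.length → l.getD i 0 ≤ l.getD j 0

def PartialHeap (l : List Int) (s hole : Nat) : Prop :=
  ∀ i j, s ≤ i → (j = 2*i+1 ∨ j = 2*i+2) → j < l.length → i ≠ hole → j ≠ hole →
    l.getD i 0 ≤ l.getD j 0

def BelowOK (l : List Int) (hole : Nat) (x : Int) : Prop :=
  ∀ j, (j = 2*hole+1 ∨ j = 2*hole+2) → j < l.length → x ≤ l.getD j 0

def CrossOK (l : List Int) (s hole : Nat) : Prop :=
  s < hole → ∀ j, (j = 2*hole+1 ∨ j = 2*hole+2) → j < l.length →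
    l.getD ((hole-1)/2) 0 ≤ l.getD j 0

-- ancestor-or-self along the parent chain
def AncB (s pos : Nat) : Bool :=
  if pos ≤ s then pos == s else AncB s ((pos-1)/2)
termination_by pos
decreasing_by omega

theorem anc_refl (s : Nat) : AncB s s = true := by rw [AncB]; simp

theorem anc_ge (s pos : Nat) (h : AncB s pos = true) : s ≤ pos := by
  rw [AncB] at h
  split_ifs at h with h1
  · simp at h; omega
  · omega

theorem anc_parent (s pos : Nat) (h : s < pos) : AncB s pos = AncB s ((pos-1)/2) := by
  rw [AncB]; simp [Nat.not_le.mpr h]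

theorem anc_child (s pos j : Nat) (h : AncB s pos = true) (hj : j = 2*pos+1 ∨ j = 2*pos+2) :
    AncB s j = true := by
  have hs := anc_ge s pos h
  have h1 : s < j := by omega
  have h2 : (j-1)/2 = pos := by omega
  rw [anc_parent s j h1, h2]; exact h

theorem anc_zero (pos : Nat) : AncB 0 pos = true := by
  induction pos using Nat.strong_induction_on with
  | _ pos ih =>
    rw [AncB]
    split_ifs with h
    · simp; omega
    · exact ih ((pos-1)/2) (by omega)

-- getD/set bookkeeping
theorem getD_set_self (l : List Int) (n : Nat) (h : n < l.length) (a : Int) :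
    (l.set n a).getD n 0 = a := by
  simp [List.getD_eq_getElem?_getD, h]

theorem getD_set_ne (l : List Int) (n m : Nat) (h : n ≠ m) (a : Int) :
    (l.set n a).getD m 0 = l.getD m 0 := by
  simp [List.getD_eq_getElem?_getD, List.getElem?_set_ne h]

theorem set_getD_self (l : List Int) (n : Nat) (h : n < l.length) :
    l.set n (l.getD n 0) = l := by
  rw [List.getD_eq_getElem l 0 h]; exact List.set_getElem_self h

theorem getD_dropLast (l : List Int) (k : Nat) (h : k < l.length - 1) :
    l.dropLast.getD k 0 = l.getD k 0 := by
  simp only [List.getD_eq_getElem?_getD, List.getElem?_dropLast, if_pos h]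

theorem getD_append_lt (l : List Int) (x : Int) (k : Nat) (h : k < l.length) :
    (l ++ [x]).getD k 0 = l.getD k 0 := by
  simp [List.getD_eq_getElem?_getD, List.getElem?_append_left h]

theorem getD_concat (l : List Int) (x : Int) : (l ++ [x]).getD l.length 0 = x := by
  simp [List.getD_eq_getElem?_getD]

-- permutation bookkeeping: writing x into slot n is, up to permutation, cons x onto the list minus slot n
theorem set_perm (l : List Int) (n : Nat) (h : n < l.length) (a : Int) :
    (l.set n a).Perm (a :: l.eraseIdx n) := List.set_perm_cons_eraseIdx h a

theorem self_perm (l : List Int) (n : Nat) (h : n < l.length) :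
    l.Perm (l.getD n 0 :: l.eraseIdx n) := by
  rw [List.getD_eq_getElem l 0 h]
  exact (List.getElem_cons_eraseIdx_perm h).symm

theorem set_set_perm (l : List Int) (p c : Nat) (hp : p < l.length) (hc : c < l.length)
    (hne : c ≠ p) (x : Int) :
    ((l.set p (l.getD c 0)).set c x).Perm (l.set p x) := by
  have hc1 : c < (l.set p (l.getD c 0)).length := by simpa using hc
  have h1 := set_perm (l.set p (l.getD c 0)) c hc1 x
  have h2 := self_perm (l.set p (l.getD c 0)) c hc1
  rw [getD_set_ne l p c (fun h => hne h.symm) (l.getD c 0)] at h2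
  have h3 := set_perm l p hp (l.getD c 0)
  have h4 : ((l.getD c 0) :: (l.set p (l.getD c 0)).eraseIdx c).Perm
      ((l.getD c 0) :: l.eraseIdx p) := h2.symm.trans h3
  have h5 := h4.cons_inv
  exact (h1.trans (h5.cons x)).trans (set_perm l p hp x).symm

-- ===== phase 2: _siftdown correctness =====
theorem length_siftdownLoop (fuel : Nat) (l : List Int) (s p : Nat) (x : Int) :
    (siftdownLoop fuel l s p x).1.length = l.length := by
  induction fuel generalizing l p with
  | zero => rfl
  | succ fuel ih =>
    simp only [siftdownLoop]
    split_ifs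
    · simpa using ih (l.set p (l.getD ((p-1)/2) 0)) ((p-1)/2)
    · rfl
    · rfl

theorem sdl_perm (fuel : Nat) (l : List Int) (s p : Nat) (x : Int)
    (hf : p < fuel) (hp : p < l.length) :
    ((siftdownLoop fuel l s p x).1.set (siftdownLoop fuel l s p x).2 x).Perm (l.set p x) := by
  induction fuel generalizing l p with
  | zero => omega
  | succ fuel ih =>
    simp only [siftdownLoop]
    split_ifs with h1 h2
    · have hplen : (p-1)/2 < (l.set p (l.getD ((p-1)/2) 0)).length := by simp; omega
      exact (ih _ _ (by omega) hplen).trans (set_set_perm l p ((p-1)/2) hp (by omega) (by omega) x)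
    · exact List.Perm.refl _
    · exact List.Perm.refl _

theorem sdl_heap (fuel : Nat) (l : List Int) (s p : Nat) (x : Int)
    (hf : p < fuel) (hp : p < l.length) (hanc : AncB s p = true)
    (hA : PartialHeap l s p) (hC : CrossOK l s p) (hD : BelowOK l p x) :
    HeapFrom ((siftdownLoop fuel l s p x).1.set (siftdownLoop fuel l s p x).2 x) s := by
  induction fuel generalizing l p with
  | zero => omega
  | succ fuel ih =>
    simp only [siftdownLoop]
    split_ifs with h1 h2
    · -- newitem still smaller than the parent: move the parent down, hole moves up
      have hanc' : AncB s ((p-1)/2) = true := by rw [← anc_parent s p h1]; exact hanc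
      have hge' : s ≤ (p-1)/2 := anc_ge _ _ hanc'
      have hplen' : (p-1)/2 < (l.set p (l.getD ((p-1)/2) 0)).length := by simp; omega
      apply ih _ _ (by omega) hplen' hanc'
      · -- PartialHeap of the shifted list with the hole moved to the parent slot
        intro i j hi hj hjlen hih hjh
        simp only [List.length_set] at hjlen
        by_cases hip : i = p
        · subst hip
          rw [getD_set_self l i hp, getD_set_ne l i j (by omega)]
          exact hC h1 j hj hjlen
        · by_cases hjp : j = p
          · exact absurd (by omega : i = (p-1)/2) hih
          · rw [getD_set_ne l p i (by omega), getD_set_ne l p j (by omega)]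
            exact hA i j hi hj hjlen hip hjp
      · -- CrossOK for the new hole
        intro hslt j hj hjlen
        simp only [List.length_set] at hjlen
        have hancg : AncB s (((p-1)/2-1)/2) = true := by
          rw [← anc_parent s ((p-1)/2) hslt]; exact hanc'
        have hgs : s ≤ ((p-1)/2-1)/2 := anc_ge _ _ hancg
        have hgp : ((p-1)/2-1)/2 ≠ p := by omega
        have key1 : l.getD (((p-1)/2-1)/2) 0 ≤ l.getD ((p-1)/2) 0 := by
          apply hA _ _ hgs (by omega) (by omega) hgp (by omega)
        by_cases hjp : j = p
        · subst hjp
          rw [getD_set_ne l j _ (by omega), getD_set_self l j hp]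
          exact key1
        · rw [getD_set_ne l p _ (by omega), getD_set_ne l p j (by omega)]
          have key2 : l.getD ((p-1)/2) 0 ≤ l.getD j 0 :=
            hA _ j (by omega) hj hjlen (by omega) hjp
          omega
      · -- BelowOK for the new hole
        intro j hj hjlen
        simp only [List.length_set] at hjlen
        by_cases hjp : j = p
        · subst hjp; rw [getD_set_self l j hp]; omega
        · rw [getD_set_ne l p j (by omega)]
          have : l.getD ((p-1)/2) 0 ≤ l.getD j 0 :=
            hA _ j (by omega) hj hjlen (by omega) hjp
          omega
    · -- loop exits with newitem ≥ parent: write newitem at the hole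
      intro i j hi hj hjlen
      simp only [List.length_set] at hjlen
      by_cases hip : i = p
      · subst hip
        rw [getD_set_self l i hp, getD_set_ne l i j (by omega)]
        exact hD j hj hjlen
      · by_cases hjp : j = p
        · subst hjp
          have hieq : i = (j-1)/2 := by omega
          rw [getD_set_ne l j i (by omega), getD_set_self l j hp]
          rw [hieq]; omega
        · rw [getD_set_ne l p i (by omega), getD_set_ne l p j (by omega)]
          exact hA i j hi hj hjlen hip hjp
    · -- hole reached startpos
      have hps : p = s := by have := anc_ge s p hanc; omega
      subst hps
      intro i j hi hj hjlen
      simp only [List.length_set] at hjlen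
      by_cases hip : i = p
      · subst hip
        rw [getD_set_self l i hp, getD_set_ne l i j (by omega)]
        exact hD j hj hjlen
      · rw [getD_set_ne l p i (by omega), getD_set_ne l p j (by omega)]
        exact hA i j hi hj hjlen hip (by omega)

-- ===== phase 1: _siftup's descent loop =====
theorem minChild_child (l : List Int) (p : Nat) :
    minChild l p = 2*p+1 ∨ minChild l p = 2*p+2 := by
  unfold minChild; split_ifs
  · right; rfl
  · left; rfl

theorem minChild_le (l : List Int) (p : Nat) (h : 2*p+1 < l.length) :
    ∀ j, (j = 2*p+1 ∨ j = 2*p+2) → j < l.length → l.getD (minChild l p) 0 ≤ l.getD j 0 := by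
  intro j hj hjlen
  unfold minChild
  split_ifs with hmc
  · rcases hj with rfl | rfl
    · omega
    · omega
  · simp only [not_and, not_not] at hmc
    rcases hj with rfl | rfl
    · omega
    · have := hmc (by omega); omega

theorem length_siftupLoop (fuel : Nat) (l : List Int) (p : Nat) :
    (siftupLoop fuel l p).1.length = l.length := by
  induction fuel generalizing l p with
  | zero => rfl
  | succ fuel ih =>
    simp only [siftupLoop]
    split_ifs
    · simpa using ih (l.set p (l.getD (minChild l p) 0)) (minChild l p)
    · rfl

theorem sul_spec (fuel : Nat) (l : List Int) (s p : Nat)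
    (hf : l.length - p ≤ fuel) (hp : p < l.length) (hanc : AncB s p = true)
    (hA : PartialHeap l s p) (hC : CrossOK l s p) :
    (siftupLoop fuel l p).2 < l.length ∧ AncB s (siftupLoop fuel l p).2 = true ∧
    ¬ (2*(siftupLoop fuel l p).2+1 < l.length) ∧
    PartialHeap (siftupLoop fuel l p).1 s (siftupLoop fuel l p).2 ∧
    CrossOK (siftupLoop fuel l p).1 s (siftupLoop fuel l p).2 := by
  induction fuel generalizing l p with
  | zero => omega
  | succ fuel ih =>
    simp only [siftupLoop]
    split_ifs with h
    · have hc := minChild_gt_lt l p h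
      have hcj := minChild_child l p
      have hsp := anc_ge s p hanc
      have hf' : (l.set p (l.getD (minChild l p) 0)).length - minChild l p ≤ fuel := by
        simp; omega
      have hplen' : minChild l p < (l.set p (l.getD (minChild l p) 0)).length := by
        simpa using hc.2
      have hanc' : AncB s (minChild l p) = true := anc_child s p _ hanc hcj
      have hA' : PartialHeap (l.set p (l.getD (minChild l p) 0)) s (minChild l p) := by
        intro i j hi hj hjlen hih hjh
        simp only [List.length_set] at hjlen
        by_cases hip : i = p
        · subst hip
          rw [getD_set_self l i hp, getD_set_ne l i j (by omega)]
          exact minChild_le l i h j hj hjlen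
        · by_cases hjp : j = p
          · subst hjp
            by_cases hslt : s < j
            · have hieq : i = (j-1)/2 := by omega
              rw [getD_set_ne l j i (by omega), getD_set_self l j hp]
              rw [hieq]
              exact hC hslt _ hcj hc.2
            · omega
          · rw [getD_set_ne l p i (by omega), getD_set_ne l p j (by omega)]
            exact hA i j hi hj hjlen hip hjp
      have hC' : CrossOK (l.set p (l.getD (minChild l p) 0)) s (minChild l p) := by
        intro _ j hj hjlen
        simp only [List.length_set] at hjlen
        have hpar : (minChild l p - 1)/2 = p := by omega
        rw [hpar, getD_set_self l p hp, getD_set_ne l p j (by omega)]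
        exact hA _ j (by omega) hj hjlen (by omega) (by omega)
      have := ih _ _ hf' hplen' hanc' hA' hC'
      simpa using this
    · exact ⟨hp, hanc, h, hA, hC⟩

theorem sul_perm (fuel : Nat) (l : List Int) (p : Nat) (x : Int)
    (hf : l.length - p ≤ fuel) (hp : p < l.length) :
    ((siftupLoop fuel l p).1.set (siftupLoop fuel l p).2 x).Perm (l.set p x) := by
  induction fuel generalizing l p with
  | zero => omega
  | succ fuel ih =>
    simp only [siftupLoop]
    split_ifs with h
    · have hc := minChild_gt_lt l p h
      have hf' : (l.set p (l.getD (minChild l p) 0)).length - minChild l p ≤ fuel := by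
        simp; omega
      have hclen : minChild l p < (l.set p (l.getD (minChild l p) 0)).length := by
        simpa using hc.2
      exact (ih _ _ hf' hclen).trans (set_set_perm l p (minChild l p) hp hc.2 (by omega) x)
    · exact List.Perm.refl _

-- ===== composite heap operations =====
theorem siftup_spec (l : List Int) (p : Nat) (hp : p < l.length) (h : HeapFrom l (p+1)) :
    HeapFrom (siftup l p) p ∧ (siftup l p).Perm l := by
  have hA0 : PartialHeap l p p := fun i j hi hj hjlen hip hjp => h i j (by omega) hj hjlen
  have hC0 : CrossOK l p p := fun hlt => absurd hlt (lt_irrefl p)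
  obtain ⟨h1, h2, h3, h4, h5⟩ := sul_spec l.length l p p (by omega) hp (anc_refl p) hA0 hC0
  have hlen1 : (siftupLoop l.length l p).1.length = l.length := length_siftupLoop l.length l p
  have hr2 : (siftupLoop l.length l p).2 < (siftupLoop l.length l p).1.length := by omega
  have hx : ((siftupLoop l.length l p).1.set (siftupLoop l.length l p).2 (l.getD p 0)).getD
      (siftupLoop l.length l p).2 0 = l.getD p 0 := getD_set_self _ _ hr2 _
  constructor
  · show HeapFrom (siftdown ((siftupLoop l.length l p).1.set (siftupLoop l.length l p).2
      (l.getD p 0)) p (siftupLoop l.length l p).2) p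
    unfold siftdown
    rw [hx]
    apply sdl_heap
    · omega
    · simpa using hr2
    · exact h2
    · intro i j hi hj hjlen hih hjh
      simp only [List.length_set] at hjlen
      rw [getD_set_ne _ _ i (fun hh => hih hh.symm), getD_set_ne _ _ j (fun hh => hjh hh.symm)]
      exact h4 i j hi hj (by omega) hih hjh
    · intro hlt j hj hjlen
      simp only [List.length_set] at hjlen
      omega
    · intro j hj hjlen
      simp only [List.length_set] at hjlen
      omega
  · show (siftdown ((siftupLoop l.length l p).1.set (siftupLoop l.length l p).2
      (l.getD p 0)) p (siftupLoop l.length l p).2).Perm l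
    unfold siftdown
    rw [hx]
    have hperm1 := sdl_perm ((siftupLoop l.length l p).2 + 1)
      ((siftupLoop l.length l p).1.set (siftupLoop l.length l p).2 (l.getD p 0)) p
      (siftupLoop l.length l p).2 (l.getD p 0) (by omega) (by simpa using hr2)
    rw [List.set_set] at hperm1
    have hperm2 := sul_perm l.length l p (l.getD p 0) (by omega) hp
    rw [set_getD_self l p hp] at hperm2
    exact (hperm1.trans hperm2)

theorem heapify_aux (k : Nat) : ∀ (l : List Int), k ≤ l.length / 2 → HeapFrom l k →
    HeapFrom ((List.range k).reverse.foldl (fun h i => siftup h i) l) 0 ∧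
    ((List.range k).reverse.foldl (fun h i => siftup h i) l).Perm l := by
  induction k with
  | zero => intro l _ hh; exact ⟨hh, List.Perm.refl l⟩
  | succ k ih =>
    intro l hk hh
    rw [List.range_succ, List.reverse_append]
    simp only [List.reverse_singleton, List.singleton_append, List.foldl_cons]
    have hkl : k < l.length := by omega
    obtain ⟨hh1, hp1⟩ := siftup_spec l k hkl hh
    have hlen : (siftup l k).length = l.length := hp1.length_eq
    obtain ⟨hh2, hp2⟩ := ih (siftup l k) (by omega) hh1
    exact ⟨hh2, hp2.trans hp1⟩

theorem heapify_spec (l : List Int) : HeapFrom (heapify l) 0 ∧ (heapify l).Perm l := by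
  unfold heapify
  apply heapify_aux (l.length / 2) l (le_refl _)
  intro i j hi hj hjlen
  omega

theorem root_min (l : List Int) (h : HeapFrom l 0) :
    ∀ j, j < l.length → l.getD 0 0 ≤ l.getD j 0 := by
  intro j
  induction j using Nat.strong_induction_on with
  | _ j ih =>
    intro hj
    rcases Nat.eq_zero_or_pos j with rfl | hpos
    · exact le_refl _
    · have hij : j = 2*((j-1)/2)+1 ∨ j = 2*((j-1)/2)+2 := by omega
      have h1 : l.getD ((j-1)/2) 0 ≤ l.getD j 0 := h ((j-1)/2) j (Nat.zero_le _) hij hj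
      have h2 : l.getD 0 0 ≤ l.getD ((j-1)/2) 0 := ih ((j-1)/2) (by omega) (by omega)
      omega

theorem length_siftup (l : List Int) (p : Nat) : (siftup l p).length = l.length := by
  unfold siftup siftdown
  simp [length_siftdownLoop, length_siftupLoop]

theorem length_heappop (l : List Int) : (heappop l).2.length = l.length - 1 := by
  unfold heappop
  split_ifs <;> simp [length_siftup]

theorem length_heappush (l : List Int) (item : Int) :
    (heappush l item).length = l.length + 1 := by
  unfold heappush siftdown; simp [length_siftdownLoop]

theorem heappop_spec (l : List Int) (hne : l ≠ []) (h : HeapFrom l 0) :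
    (heappop l).1 = l.getD 0 0 ∧ ((heappop l).1 :: (heappop l).2).Perm l ∧
    HeapFrom (heappop l).2 0 := by
  unfold heappop
  by_cases hdl : l.dropLast.isEmpty
  · rw [if_pos hdl]
    match l, hne with
    | [a], _ =>
      refine ⟨rfl, List.Perm.refl _, ?_⟩
      intro i j hi hj hjlen
      simp at hjlen
    | a :: b :: t, _ => simp [List.dropLast] at hdl
  · rw [if_neg hdl]
    have hrne : l.dropLast ≠ [] := by simpa [List.isEmpty_iff] using hdl
    have hlen2 : 2 ≤ l.length := by
      have h1 : l.dropLast.length = l.length - 1 := List.length_dropLast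
      have h2 : 0 < l.dropLast.length := List.length_pos_iff.mpr hrne
      omega
    have hlast : l.getLast?.getD 0 = l.getLast hne := by
      rw [List.getLast?_eq_some_getLast hne]; rfl
    obtain ⟨r0, rt, hrest⟩ : ∃ a t, l.dropLast = a :: t := by
      cases hcl : l.dropLast with
      | nil => exact absurd hcl hrne
      | cons a t => exact ⟨a, t, rfl⟩
    have hL2 : l.dropLast.set 0 (l.getLast?.getD 0) = (l.getLast?.getD 0) :: rt := by
      rw [hrest]; rfl
    have hL2len : 0 < (l.dropLast.set 0 (l.getLast?.getD 0)).length := by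
      simp [hrest]
    -- the shortened heap with the last element moved to the root is a heap from index 1
    have hH1 : HeapFrom (l.dropLast.set 0 (l.getLast?.getD 0)) 1 := by
      intro i j hi hj hjlen
      simp only [List.length_set, List.length_dropLast] at hjlen
      rw [getD_set_ne _ _ i (by omega), getD_set_ne _ _ j (by omega),
        getD_dropLast l i (by omega), getD_dropLast l j (by omega)]
      exact h i j (by omega) hj (by omega)
    obtain ⟨hh2, hp2⟩ := siftup_spec _ 0 hL2len hH1
    have hget0 : l.dropLast.getD 0 0 = l.getD 0 0 := getD_dropLast l 0 (by omega)
    refine ⟨hget0, ?_, hh2⟩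
    dsimp only
    rw [hget0]
    have step1 : (l.getD 0 0 :: siftup (l.dropLast.set 0 (l.getLast?.getD 0)) 0).Perm
        (l.getD 0 0 :: ((l.getLast?.getD 0) :: rt)) := by
      exact (hp2.trans (by rw [hL2])).cons _
    apply step1.trans
    have step2 : ((l.getLast?.getD 0) :: rt).Perm (rt ++ [l.getLast?.getD 0]) :=
      (List.perm_append_singleton _ _).symm
    have step3 := (step2.cons (l.getD 0 0)).trans (List.Perm.refl _)
    apply step3.trans
    have hfin : l.getD 0 0 :: (rt ++ [l.getLast?.getD 0]) = l := by
      rw [hlast]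
      have : l.getD 0 0 = r0 := by rw [← hget0, hrest]; rfl
      rw [this]
      have : r0 :: (rt ++ [l.getLast hne]) = (r0 :: rt) ++ [l.getLast hne] := rfl
      rw [this, ← hrest, List.dropLast_append_getLast hne]
    rw [hfin]

theorem heappush_spec (l : List Int) (x : Int) (h : HeapFrom l 0) :
    HeapFrom (heappush l x) 0 ∧ (heappush l x).Perm (x :: l) := by
  unfold heappush
  have hx : (l ++ [x]).getD l.length 0 = x := getD_concat l x
  constructor
  · show HeapFrom (siftdown (l ++ [x]) 0 l.length) 0
    unfold siftdown
    rw [hx]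
    apply sdl_heap
    · omega
    · simp
    · exact anc_zero l.length
    · intro i j hi hj hjlen hih hjh
      simp only [List.length_append, List.length_singleton] at hjlen
      rw [getD_append_lt l x i (by omega), getD_append_lt l x j (by omega)]
      exact h i j hi hj (by omega)
    · intro hlt j hj hjlen
      simp only [List.length_append, List.length_singleton] at hjlen
      omega
    · intro j hj hjlen
      simp only [List.length_append, List.length_singleton] at hjlen
      omega
  · show (siftdown (l ++ [x]) 0 l.length).Perm (x :: l)
    unfold siftdown
    rw [hx]
    have hperm1 := sdl_perm (l.length + 1) (l ++ [x]) 0 l.length x (by omega) (by simp)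
    have : (l ++ [x]).set l.length x = l ++ [x] := by
      have h2 := set_getD_self (l ++ [x]) l.length (by simp)
      rw [hx] at h2
      exact h2
    rw [this] at hperm1
    exact hperm1.trans (List.perm_append_singleton x l)

-- ===== B-side =====
theorem insSorted_perm (t : List Int) (x : Int) : (insSorted t x).Perm (x :: t) := by
  induction t with
  | nil => rfl
  | cons h t ih =>
    unfold insSorted
    split_ifs
    · exact (ih.cons h).trans (List.Perm.swap x h t)
    · rfl

theorem insSorted_sorted (t : List Int) (x : Int) (h : List.Pairwise (· ≤ ·) t) :
    List.Pairwise (· ≤ ·) (insSorted t x) := by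
  induction t with
  | nil => simp [insSorted]
  | cons a t ih =>
    rw [List.pairwise_cons] at h
    unfold insSorted
    split_ifs with hax
    · rw [List.pairwise_cons]
      refine ⟨fun b hb => ?_, ih h.2⟩
      rcases List.mem_cons.mp ((insSorted_perm t x).mem_iff.mp hb) with rfl | hbt
      · exact le_of_lt hax
      · exact h.1 b hbt
    · rw [List.pairwise_cons]
      exact ⟨fun b hb => by
        rcases List.mem_cons.mp hb with rfl | hbt
        · omega
        · exact le_trans (by omega) (h.1 b hbt), List.pairwise_cons.mpr h⟩

-- head of a sorted list is a minimum
theorem sorted_head_min (s0 : Int) (t : List Int) (h : List.Pairwise (· ≤ ·) (s0 :: t)) :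
    ∀ y ∈ s0 :: t, s0 ≤ y := by
  intro y hy
  rcases List.mem_cons.mp hy with rfl | hyt
  · exact le_refl y
  · exact (List.pairwise_cons.mp h).1 y hyt

theorem heap_min (l : List Int) (hh : HeapFrom l 0) : ∀ y ∈ l, l.getD 0 0 ≤ y := by
  intro y hy
  obtain ⟨i, hi, rfl⟩ := List.mem_iff_getElem.mp hy
  rw [← List.getD_eq_getElem l 0 hi]
  exact root_min l hh i hi

theorem length_insSorted (xs : List Int) (x : Int) :
    (insSorted xs x).length = xs.length + 1 := by
  induction xs with
  | nil => rfl
  | cons h t ih => unfold insSorted; split_ifs <;> simp [ih]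

theorem solveAltLoop_small (fb : Nat) (s : List Int) (cost : Int) (hs : s.length ≤ 1) :
    solveAltLoop fb s cost = cost := by
  cases fb with
  | zero => rfl
  | succ fb =>
    match s, hs with
    | [], _ => rfl
    | [a], _ => rfl

-- ===== the simulation: both loops combine the two smallest remaining values =====
theorem sim (fa : Nat) : ∀ (fb : Nat) (h s : List Int) (cost : Int),
    h.length ≤ fa → s.length ≤ fb → HeapFrom h 0 → List.Pairwise (· ≤ ·) s →
    h.Perm s → solveLoop fa h cost = solveAltLoop fb s cost := by
  induction fa with
  | zero =>
    intro fb h s cost hlen hlenb hh hs hperm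
    have : s.length ≤ 1 := by rw [← hperm.length_eq]; omega
    rw [solveAltLoop_small fb s cost this]; rfl
  | succ fa ih =>
    intro fb h s cost hlen hlenb hh hs hperm
    by_cases hbig : h.length > 1
    · -- both loops combine the two smallest elements of the same multiset
      simp only [solveLoop, if_pos hbig]
      have hne : h ≠ [] := by intro e; rw [e] at hbig; simp at hbig
      obtain ⟨ha1, hap, hah⟩ := heappop_spec h hne hh
      have hlen1 : (heappop h).2.length = h.length - 1 := length_heappop h
      have hne1 : (heappop h).2 ≠ [] := by
        intro e
        rw [e] at hlen1
        simp at hlen1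
        omega
      obtain ⟨hb1, hbp, hbh⟩ := heappop_spec (heappop h).2 hne1 hah
      obtain ⟨s0, s1, t, rfl⟩ : ∃ a b t, s = a :: b :: t := by
        have hsl : 2 ≤ s.length := by rw [← hperm.length_eq]; omega
        match s, hsl with
        | a :: b :: t, _ => exact ⟨a, b, t, rfl⟩
      -- the first popped element is s0
      have hmem0 : h.getD 0 0 ∈ h := by
        rw [List.getD_eq_getElem h 0 (by omega)]
        exact List.getElem_mem _
      have has0 : (heappop h).1 = s0 := by
        rw [ha1]
        have h1 : s0 ≤ h.getD 0 0 :=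
          sorted_head_min s0 (s1 :: t) hs _ (hperm.mem_iff.mp hmem0)
        have h2 : h.getD 0 0 ≤ s0 :=
          heap_min h hh s0 (hperm.mem_iff.mpr (by simp))
        omega
      have hperm1 : (heappop h).2.Perm (s1 :: t) := by
        have := hap.trans hperm
        rw [has0] at this
        exact this.cons_inv
      -- the second popped element is s1
      have hs1 : List.Pairwise (· ≤ ·) (s1 :: t) := (List.pairwise_cons.mp hs).2
      have hmem1 : (heappop h).2.getD 0 0 ∈ (heappop h).2 := by
        rw [List.getD_eq_getElem _ 0 (by omega)]
        exact List.getElem_mem _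
      have hbs1 : (heappop (heappop h).2).1 = s1 := by
        rw [hb1]
        have h1 : s1 ≤ (heappop h).2.getD 0 0 :=
          sorted_head_min s1 t hs1 _ (hperm1.mem_iff.mp hmem1)
        have h2 : (heappop h).2.getD 0 0 ≤ s1 :=
          heap_min _ hah s1 (hperm1.mem_iff.mpr (by simp))
        omega
      have hperm2 : (heappop (heappop h).2).2.Perm t := by
        have := hbp.trans hperm1
        rw [hbs1] at this
        exact this.cons_inv
      obtain ⟨hph, hpp⟩ := heappush_spec (heappop (heappop h).2).2
        ((heappop h).1 + (heappop (heappop h).2).1) hbh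
      have hperm3 : (heappush (heappop (heappop h).2).2
          ((heappop h).1 + (heappop (heappop h).2).1)).Perm (insSorted t (s0 + s1)) := by
        apply hpp.trans
        rw [has0, hbs1]
        exact ((hperm2.cons _)).trans (insSorted_perm t (s0 + s1)).symm
      have hlen2 : (heappop (heappop h).2).2.length = h.length - 2 := by
        rw [length_heappop, hlen1]; omega
      have hlen3 : (heappush (heappop (heappop h).2).2
          ((heappop h).1 + (heappop (heappop h).2).1)).length = h.length - 1 := by
        rw [length_heappush, hlen2]; omega
      have hsorted3 : List.Pairwise (· ≤ ·) (insSorted t (s0 + s1)) :=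
        insSorted_sorted t (s0 + s1) (List.pairwise_cons.mp hs1).2
      obtain ⟨fb', rfl⟩ : ∃ k, fb = k + 1 := ⟨fb - 1, by simp at hlenb; omega⟩
      simp only [solveAltLoop]
      have hlenins : (insSorted t (s0 + s1)).length ≤ fb' := by
        have hlenb' : t.length + 2 ≤ fb' + 1 := by simpa using hlenb
        rw [length_insSorted]
        omega
      have := ih fb' _ _ (cost + ((heappop h).1 + (heappop (heappop h).2).1))
        (by rw [hlen3]; omega) hlenins hph hsorted3 hperm3
      rw [this, has0, hbs1]
    · -- 0 or 1 elements left: both loops stop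
      simp only [solveLoop, if_neg hbig]
      have hsl : s.length ≤ 1 := by rw [← hperm.length_eq]; omega
      rw [solveAltLoop_small fb s cost hsl]

-- ===== VERDICT (by name: the statement is the Claim_ definition above) =====
theorem solve_spec : Claim_equal_solve := by
  intro A _
  unfold Spec_solve solve solve_alt
  have hfy := heapify_spec A
  have hsp : List.Pairwise (· ≤ ·) (PySem.List.sorted A (fun x => x) false) := by
    have := PySem.List.sorted_pairwise (xs := A) (key := fun x => x)
    simpa using this
  exact sim (heapify A).length _ (heapify A) _ 0 (le_refl _) (le_refl _) hfy.1 hsp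
    (hfy.2.trans (PySem.List.sorted_perm A (fun x => x) false).symm)
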